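-- pv_equiv track=rewrite | github.com/muhibh22/Artificial-Intelligence | 7_19101131_Md_Mohibul_Hasan.py | zero_checker
-- ===== SOURCE A (Python) =====
-- def zero_checker(p1):
--     zero=[]
--     for i in range(len(p1)):
--         zero.append(0)
--     if p1 == zero:
--         return False
--     else:
--         return True
-- ===== SOURCE B (Python) =====
-- def zero_checker(p1):
--     return any(x != 0 for x in p1)
-- ===== Notes on version B (the rewrite author's own statement) =====
-- stated objective: simpler
-- what changed: Replaced building an auxiliary list of zeros and comparing it to the input with a single short-circuiting scan any(x != 0 for x in p1).
import Mathlib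
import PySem

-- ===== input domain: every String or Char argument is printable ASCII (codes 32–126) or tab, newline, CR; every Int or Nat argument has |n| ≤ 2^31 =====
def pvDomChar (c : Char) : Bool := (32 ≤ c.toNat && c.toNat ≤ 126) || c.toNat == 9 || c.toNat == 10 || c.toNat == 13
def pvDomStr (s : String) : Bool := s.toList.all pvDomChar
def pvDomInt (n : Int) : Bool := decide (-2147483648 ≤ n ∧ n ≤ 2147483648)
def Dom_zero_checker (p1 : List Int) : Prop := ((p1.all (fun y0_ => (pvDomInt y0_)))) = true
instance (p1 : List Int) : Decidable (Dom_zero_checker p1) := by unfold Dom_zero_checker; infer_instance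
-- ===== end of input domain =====

-- B replaces A's build-a-zero-list-and-compare with a single short-circuiting scan (simpler).

-- ===== PORT A =====
-- builds zero = [0]*len(p1) by appending in a loop, then compares p1 to it
def zero_checker (p1 : List Int) : Bool :=
  let zero := (PySem.List.pyRange 0 p1.length 1).foldl (fun z _ => z ++ [0]) []
  if p1 = zero then false else true

-- ===== PORT B =====
-- any(x != 0 for x in p1)
def zero_checker_alt (p1 : List Int) : Bool :=
  p1.any (fun x => x != 0)

-- ===== PRECONDITION & SPEC =====
def Spec_zero_checker (p1 : List Int) (out : Bool) : Prop := out = zero_checker_alt p1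
instance (p1 : List Int) (out : Bool) : Decidable (Spec_zero_checker p1 out) := by unfold Spec_zero_checker; infer_instance

-- ===== CLAIM (what is proved, stated in full; the proofs are below) =====
def Claim_equal_zero_checker : Prop := ∀ (p1 : List Int), Dom_zero_checker p1 → Spec_zero_checker p1 (zero_checker p1)

-- ===== LEMMAS AND PROOFS =====
lemma pv_foldl_append_zero (l : List Int) (acc : List Int) :
    l.foldl (fun z (_ : Int) => z ++ [(0 : Int)]) acc = acc ++ List.replicate l.length 0 := by
  induction l generalizing acc with
  | nil => simp
  | cons h t ih => simp [List.foldl, ih, List.replicate_succ]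
      <;> simp [List.append_assoc, List.replicate_succ']

lemma pv_zero_list (n : ℕ) :
    (PySem.List.pyRange 0 n 1).foldl (fun z (_ : Int) => z ++ [(0 : Int)]) []
      = List.replicate n 0 := by
  have h := pv_foldl_append_zero (PySem.List.pyRange 0 n 1) []
  simpa [PySem.List.length_pyRange_one] using h

lemma pv_eq_replicate_iff (p1 : List Int) :
    p1 = List.replicate p1.length 0 ↔ ∀ x ∈ p1, x = 0 := by
  constructor
  · intro h x hx
    rw [h] at hx
    exact List.eq_of_mem_replicate hx
  · intro h
    exact (List.eq_replicate_iff.mpr ⟨rfl, h⟩)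

-- ===== VERDICT (by name: the statement is the Claim_ definition above) =====
theorem zero_checker_spec : Claim_equal_zero_checker := by
  intro p1 _
  unfold Spec_zero_checker zero_checker zero_checker_alt
  simp only [pv_zero_list]
  by_cases h : p1 = List.replicate p1.length 0
  · rw [if_pos h]
    symm
    rw [List.any_eq_false]
    intro x hx
    simpa using (pv_eq_replicate_iff p1).mp h x hx
  · rw [if_neg h]
    symm
    rw [List.any_eq_true]
    have := (pv_eq_replicate_iff p1).not.mp h
    push_neg at this
    obtain ⟨x, hx, hx0⟩ := this
    exact ⟨x, hx, by simpa using hx0⟩
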